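-- pv_equiv track=rewrite | github.com/pypi-data/pypi-mirror-383 | packages/mcp-kql-server/mcp_kql_server-2.0.7.tar.gz/mcp_kql_server-2.0.7/mcp_kql_server/memory.py | _compress_token
-- ===== SOURCE A (Python) =====
-- from typing import Any, Dict, List, Optional, Union, Set, Tuple
--
-- SPECIAL_TOKENS = {
--     "CLUSTER_START": "<CLUSTER>",
--     "CLUSTER_END": "</CLUSTER>",
--     "DATABASE_START": "<DB>",
--     "DATABASE_END": "</DB>",
--     "TABLE_START": "<TABLE>",
--     "TABLE_END": "</TABLE>",
--     "COLUMN_START": "<COL>",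
--     "COLUMN_END": "</COL>",
--     "TYPE_START": "<TYPE>",
--     "TYPE_END": "</TYPE>",
--     "DESCRIPTION_START": "<DESC>",
--     "DESCRIPTION_END": "</DESC>",
--     "SUMMARY_START": "<SUMMARY>",
--     "SUMMARY_END": "</SUMMARY>",
--     "TAGS_START": "<TAGS>",
--     "TAGS_END": "</TAGS>",
--     "SAMPLES_START": "<SAMPLES>",
--     "SAMPLES_END": "</SAMPLES>",
--     "QUERY_START": "<QUERY>",
--     "QUERY_END": "</QUERY>",
-- }
--
-- def _compress_token(token: str, max_size: int) -> Optional[str]: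
--     """Compress token to fit within size limit."""
--     if len(token) <= max_size:
--         return token
--
--     if max_size < 100:
--         return None
--
--     # Split token into parts
--     parts = token.split("|")
--     if len(parts) < 4:  # Need at least cluster, database, table, summary
--         return None
--
--     # Keep essential parts
--     essential_parts = parts[:4]  # cluster, database, table, summary
--     essential_size = sum(
--         len(part) + 1 for part in essential_parts
--     )  # +1 for separators
--
--     if essential_size >= max_size:
--         return None
--
--     # Add columns until size limit
--     remaining_size = max_size - essential_size
--     column_parts = []
--
--     for part in parts[4:]:  # Column parts
--         if len(part) + 1 <= remaining_size:
--             column_parts.append(part)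
--             remaining_size -= len(part) + 1
--         else:
--             break
--
--     compressed_parts = essential_parts + column_parts
--
--     # Add truncation indicator if needed
--     if len(column_parts) < len(parts) - 4:
--         truncated_count = len(parts) - 4 - len(column_parts)
--         truncated_part = (
--             f"{SPECIAL_TOKENS['COLUMN']}+{truncated_count}_more"
--             f"{SPECIAL_TOKENS['DESCRIPTION']}truncated"
--         )
--         compressed_parts.append(truncated_part)
--
--     return "|".join(compressed_parts)
-- ===== SOURCE B (Python) =====
-- SPECIAL_TOKENS = {
--     "CLUSTER_START": "<CLUSTER>",
--     "CLUSTER_END": "</CLUSTER>",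
--     "DATABASE_START": "<DB>",
--     "DATABASE_END": "</DB>",
--     "TABLE_START": "<TABLE>",
--     "TABLE_END": "</TABLE>",
--     "COLUMN_START": "<COL>",
--     "COLUMN_END": "</COL>",
--     "TYPE_START": "<TYPE>",
--     "TYPE_END": "</TYPE>",
--     "DESCRIPTION_START": "<DESC>",
--     "DESCRIPTION_END": "</DESC>",
--     "SUMMARY_START": "<SUMMARY>",
--     "SUMMARY_END": "</SUMMARY>",
--     "TAGS_START": "<TAGS>",
--     "TAGS_END": "</TAGS>",
--     "SAMPLES_START": "<SAMPLES>",
--     "SAMPLES_END": "</SAMPLES>",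
--     "QUERY_START": "<QUERY>",
--     "QUERY_END": "</QUERY>",
-- }
--
--
-- def _compress_token(token, max_size):
--     """Compress token to fit within size limit (prefix sums + binary search)."""
--     if len(token) <= max_size:
--         return token
--     if max_size < 100:
--         return None
--     parts = token.split("|")
--     n = len(parts)
--     if n < 4:
--         return None
--     # pref[j] = cost of keeping the first j parts (their lengths plus one
--     # separator each).
--     pref = [0]
--     for p in parts:
--         pref.append(pref[-1] + len(p) + 1)
--     if pref[4] >= max_size:
--         return None
--     # Largest k in [4, n] with pref[k] <= max_size (pref is strictly
--     # increasing, so binary search finds the greedy cut-off).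
--     lo, hi = 4, n
--     while lo < hi:
--         mid = (lo + hi + 1) // 2
--         if pref[mid] <= max_size:
--             lo = mid
--         else:
--             hi = mid - 1
--     kept = parts[:lo]
--     if lo < n:
--         kept.append(
--             "%s+%d_more%struncated"
--             % (SPECIAL_TOKENS["COLUMN_START"], n - lo, SPECIAL_TOKENS["DESCRIPTION_START"])
--         )
--     return "|".join(kept)
-- ===== Notes on version B (the rewrite author's own statement) =====
-- stated objective: alternative
-- what changed: Replaces A's greedy subtract-and-break loop over column parts with a prefix-sum cost table and a binary search for the largest affordable prefix, and uses the intended SPECIAL_TOKENS keys (COLUMN_START/DESCRIPTION_START) in the truncation indicator.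
-- crash fix: Whenever the token is over the limit, max_size >= 100, there are >= 4 pipe-separated parts and the four essential parts fit, A raises KeyError (SPECIAL_TOKENS has no 'COLUMN'/'DESCRIPTION' keys), while B returns the compressed string with the '<COL>+N_more<DESC>truncated' indicator. — e.g. on _compress_token("c|d|t|s|xxxxxxxxxxxxxxxxxxxxxxxxxxxxxxxxxxxxxxxxxxxxxxxxxxxxxxxxxxxxxxxxxxxxxxxxxxxxxxxxxxxxxxxxxxxxxxxx", 100): A raises KeyError, B returns some "c|d|t|s|<COL>+1_more<DESC>truncated"
import Mathlib
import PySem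

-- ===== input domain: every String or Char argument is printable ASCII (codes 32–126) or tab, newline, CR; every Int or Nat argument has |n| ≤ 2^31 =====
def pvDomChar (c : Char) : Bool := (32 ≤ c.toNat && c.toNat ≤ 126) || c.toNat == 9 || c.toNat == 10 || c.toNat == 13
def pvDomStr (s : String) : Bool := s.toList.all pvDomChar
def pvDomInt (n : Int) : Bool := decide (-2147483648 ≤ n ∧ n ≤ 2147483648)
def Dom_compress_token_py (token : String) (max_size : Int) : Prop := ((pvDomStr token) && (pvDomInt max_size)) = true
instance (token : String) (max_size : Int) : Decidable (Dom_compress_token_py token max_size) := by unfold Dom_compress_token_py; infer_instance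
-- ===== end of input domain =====

-- B replaces A's greedy subtract-and-break column loop by a prefix-sum table plus binary
-- search, and uses the intended SPECIAL_TOKENS keys where A's lookup raises KeyError;
-- equivalence is claimed on the inputs where A returns (Pre_ below).

-- ===== PORT A =====
-- the module constant SPECIAL_TOKENS (a dict; note: no "COLUMN"/"DESCRIPTION" keys)
def pvSpecialTokens : PySem.Dict String String := PySem.Dict.ofList
  [("CLUSTER_START", "<CLUSTER>"), ("CLUSTER_END", "</CLUSTER>"),
   ("DATABASE_START", "<DB>"), ("DATABASE_END", "</DB>"),
   ("TABLE_START", "<TABLE>"), ("TABLE_END", "</TABLE>"),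
   ("COLUMN_START", "<COL>"), ("COLUMN_END", "</COL>"),
   ("TYPE_START", "<TYPE>"), ("TYPE_END", "</TYPE>"),
   ("DESCRIPTION_START", "<DESC>"), ("DESCRIPTION_END", "</DESC>"),
   ("SUMMARY_START", "<SUMMARY>"), ("SUMMARY_END", "</SUMMARY>"),
   ("TAGS_START", "<TAGS>"), ("TAGS_END", "</TAGS>"),
   ("SAMPLES_START", "<SAMPLES>"), ("SAMPLES_END", "</SAMPLES>"),
   ("QUERY_START", "<QUERY>"), ("QUERY_END", "</QUERY>")]

-- A's 'for part in parts[4:]: … else break' loop, carrying (column_parts, remaining_size)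
def pvALoop : List (List Char) → Int → List (List Char) → List (List Char) × Int
  | [], rem, acc => (acc, rem)
  | p :: ps, rem, acc =>
    if (p.length : Int) + 1 ≤ rem then pvALoop ps (rem - ((p.length : Int) + 1)) (acc ++ [p])
    else (acc, rem)

def compress_token_py (token : String) (max_size : Int) : Option String :=
  if PySem.Str.len token ≤ max_size then some token
  else if max_size < 100 then none
  else
    let parts := PySem.Chars.splitOn token.toList ['|']
    if (parts.length : Int) < 4 then none
    else
      let essential_parts := PySem.List.slice parts (some 0) (some 4)
      let essential_size := (essential_parts.map (fun p => (p.length : Int) + 1)).sum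
      if essential_size ≥ max_size then none
      else
        let remaining_size := max_size - essential_size
        let column_parts := (pvALoop (PySem.List.slice parts (some 4) none) remaining_size []).1
        let compressed_parts := essential_parts ++ column_parts
        if (column_parts.length : Int) < (parts.length : Int) - 4 then
          -- SPECIAL_TOKENS['COLUMN'] / ['DESCRIPTION']: the keys are absent, Python raises
          -- KeyError here (none = the raise; Pre_ excludes this branch)
          match pvSpecialTokens.get? "COLUMN", pvSpecialTokens.get? "DESCRIPTION" with
          | some c, some d =>
            let truncated_count := (parts.length : Int) - 4 - (column_parts.length : Int)
            some (String.ofList (PySem.Chars.join ['|'] (compressed_parts ++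
              [c.toList ++ ['+'] ++ PySem.Int.toChars truncated_count ++ "_more".toList
                ++ d.toList ++ "truncated".toList])))
          | _, _ => none
        else
          some (String.ofList (PySem.Chars.join ['|'] compressed_parts))

-- ===== PORT B =====
-- pref[j] = cost of keeping the first j parts (pref = [0]; for p in parts: pref.append(pref[-1] + len(p) + 1))
def pvPrefStep : List Int → List Char → List Int :=
  fun pref p => pref ++ [PySem.List.pyGetD pref (-1) 0 + (p.length : Int) + 1]

def pvPref (parts : List (List Char)) : List Int := parts.foldl pvPrefStep [0]

-- the while-loop binary search; fuel only makes the recursion structural (hi - lo shrinks each step)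
def pvBSearch (pref : List Int) (max_size : Int) : Nat → Int → Int → Int
  | 0, lo, _ => lo
  | fuel + 1, lo, hi =>
    if lo < hi then
      let mid := PySem.Int.floordiv (lo + hi + 1) 2
      if PySem.List.pyGetD pref mid 0 ≤ max_size then pvBSearch pref max_size fuel mid hi
      else pvBSearch pref max_size fuel lo (mid - 1)
    else lo

def compress_token_py_alt (token : String) (max_size : Int) : Option String :=
  if PySem.Str.len token ≤ max_size then some token
  else if max_size < 100 then none
  else
    let parts := PySem.Chars.splitOn token.toList ['|']
    let n := parts.length
    if (n : Int) < 4 then none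
    else
      let pref := pvPref parts
      if PySem.List.pyGetD pref 4 0 ≥ max_size then none
      else
        let k := pvBSearch pref max_size pref.length 4 (n : Int)
        let kept := PySem.List.slice parts (some 0) (some k)
        let kept := if k < (n : Int) then
            kept ++ [(PySem.Dict.getD pvSpecialTokens "COLUMN_START" "").toList ++ ['+']
              ++ PySem.Int.toChars ((n : Int) - k) ++ "_more".toList
              ++ (PySem.Dict.getD pvSpecialTokens "DESCRIPTION_START" "").toList ++ "truncated".toList]
          else kept
        some (String.ofList (PySem.Chars.join ['|'] kept))

-- ===== PRECONDITION & SPEC =====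
-- Pre_ excludes exactly the inputs on which A raises KeyError (token over the limit,
-- max_size ≥ 100, ≥ 4 parts and the essential parts fit): nowhere else.
def Pre_compress_token_py (token : String) (max_size : Int) : Prop :=
  PySem.Str.len token ≤ max_size ∨ max_size < 100 ∨
  (((PySem.Chars.splitOn token.toList ['|']).length : Int) < 4) ∨
  max_size ≤ (((PySem.Chars.splitOn token.toList ['|']).take 4).map (fun p => (p.length : Int) + 1)).sum
instance (token : String) (max_size : Int) : Decidable (Pre_compress_token_py token max_size) := by
  unfold Pre_compress_token_py; infer_instance

def pvWitness_compress_token_py : String × Int := ("c|d|t|summary", 100)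

-- Whenever the token is over the limit, max_size ≥ 100, there are ≥ 4 pipe-separated parts and
-- the four essential parts fit, A raises KeyError (SPECIAL_TOKENS has no 'COLUMN'/'DESCRIPTION'
-- keys), while B returns the compressed string with the '<COL>+N_more<DESC>truncated' indicator.
def Raises_compress_token_py (token : String) (max_size : Int) : Prop :=
  max_size < PySem.Str.len token ∧ 100 ≤ max_size ∧
  4 ≤ ((PySem.Chars.splitOn token.toList ['|']).length : Int) ∧
  (((PySem.Chars.splitOn token.toList ['|']).take 4).map (fun p => (p.length : Int) + 1)).sum < max_size
instance (token : String) (max_size : Int) : Decidable (Raises_compress_token_py token max_size) := by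
  unfold Raises_compress_token_py; infer_instance

def pvRaiseWitness_compress_token_py : String × Int :=
  ("c|d|t|s|xxxxxxxxxxxxxxxxxxxxxxxxxxxxxxxxxxxxxxxxxxxxxxxxxxxxxxxxxxxxxxxxxxxxxxxxxxxxxxxxxxxxxxxxxxxxxxxx", 100)
def pvRaiseWitnessOut_compress_token_py : Option String := some "c|d|t|s|<COL>+1_more<DESC>truncated"

def Spec_compress_token_py (token : String) (max_size : Int) (out : Option String) : Prop := out = compress_token_py_alt token max_size
instance (token : String) (max_size : Int) (out : Option String) : Decidable (Spec_compress_token_py token max_size out) := by unfold Spec_compress_token_py; infer_instance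

-- ===== CLAIM (what is proved, stated in full; the proofs are below) =====
def Claim_equal_compress_token_py : Prop := ∀ (token : String) (max_size : Int), Dom_compress_token_py token max_size → Pre_compress_token_py token max_size → Spec_compress_token_py token max_size (compress_token_py token max_size)

def Claim_raises_compress_token_py : Prop := (∀ (token : String) (max_size : Int), Dom_compress_token_py token max_size → Raises_compress_token_py token max_size → ¬ Pre_compress_token_py token max_size) ∧ (Dom_compress_token_py (pvRaiseWitness_compress_token_py.1) (pvRaiseWitness_compress_token_py.2) ∧ Raises_compress_token_py (pvRaiseWitness_compress_token_py.1) (pvRaiseWitness_compress_token_py.2) ∧ compress_token_py_alt (pvRaiseWitness_compress_token_py.1) (pvRaiseWitness_compress_token_py.2) = pvRaiseWitnessOut_compress_token_py)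

-- ===== LEMMAS AND PROOFS =====

-- folding pvPrefStep only ever appends to the accumulator
lemma pvPrefStep_foldl_append (xs : List (List Char)) (acc : List Int) :
    ∃ t, List.foldl pvPrefStep acc xs = acc ++ t := by
  induction xs generalizing acc with
  | nil => exact ⟨[], by simp⟩
  | cons p ps ih =>
    obtain ⟨t, ht⟩ := ih (pvPrefStep acc p)
    exact ⟨_, by simpa [pvPrefStep, List.append_assoc] using ht⟩

-- the 5th prefix entry is the cost of the four essential parts
lemma pvPref_at4 (p0 p1 p2 p3 : List Char) (rest : List (List Char)) :
    PySem.List.pyGetD (pvPref (p0::p1::p2::p3::rest)) 4 0 =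
      (p0.length:Int) + 1 + (p1.length:Int) + 1 + (p2.length:Int) + 1 + (p3.length:Int) + 1 := by
  have hacc : pvPrefStep (pvPrefStep (pvPrefStep (pvPrefStep [0] p0) p1) p2) p3 =
      [0, (p0.length:Int)+1, (p0.length:Int)+1+(p1.length:Int)+1,
       (p0.length:Int)+1+(p1.length:Int)+1+(p2.length:Int)+1,
       (p0.length:Int)+1+(p1.length:Int)+1+(p2.length:Int)+1+(p3.length:Int)+1] := by
    simp [pvPrefStep, PySem.List.pyGetD_neg_one]
  obtain ⟨t, ht⟩ := pvPrefStep_foldl_append rest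
    (pvPrefStep (pvPrefStep (pvPrefStep (pvPrefStep [0] p0) p1) p2) p3)
  have hp : pvPref (p0::p1::p2::p3::rest) =
      List.foldl pvPrefStep (pvPrefStep (pvPrefStep (pvPrefStep (pvPrefStep [0] p0) p1) p2) p3) rest := by
    simp [pvPref, List.foldl]
  rw [hp, ht, hacc]
  simp [pysem]

-- the cost of the four essential parts, as A computes it
lemma pvEssential_sum (p0 p1 p2 p3 : List Char) (rest : List (List Char)) :
    ((PySem.List.slice (p0::p1::p2::p3::rest) (some 0) (some 4)).map
      (fun p => (p.length : Int) + 1)).sum =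
      (p0.length:Int) + 1 + (p1.length:Int) + 1 + (p2.length:Int) + 1 + (p3.length:Int) + 1 := by
  rw [PySem.List.slice_zero_start, PySem.List.slice_to _ (show (0:Int) ≤ 4 by norm_num),
      show (4:Int).toNat = 4 from rfl]
  simp [List.take_succ_cons]
  ring

-- ===== VERDICT (by name: the statement is the Claim_ definition above) =====
theorem compress_token_py_spec : Claim_equal_compress_token_py := by
  intro token max_size hdom hpre
  unfold Spec_compress_token_py compress_token_py compress_token_py_alt
  by_cases h1 : PySem.Str.len token ≤ max_size
  · simp only [if_pos h1]
  by_cases h2 : max_size < 100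
  · simp only [if_neg h1, if_pos h2]
  simp only [if_neg h1, if_neg h2]
  unfold Pre_compress_token_py at hpre
  generalize hP : PySem.Chars.splitOn token.toList ['|'] = parts at *
  by_cases h3 : (parts.length : Int) < 4
  · simp only [if_pos h3]
  simp only [if_neg h3]
  -- the essential-size guard must hold, else A raises (excluded by Pre_)
  have h4 : max_size ≤ ((parts.take 4).map (fun p => (p.length : Int) + 1)).sum := by
    rcases hpre with h | h | h | h <;> omega
  rcases parts with _ | ⟨p0, _ | ⟨p1, _ | ⟨p2, _ | ⟨p3, rest⟩⟩⟩⟩ <;> simp at h3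
  simp at h4
  have hA : ((PySem.List.slice (p0::p1::p2::p3::rest) (some 0) (some 4)).map
      (fun p => (p.length : Int) + 1)).sum ≥ max_size := by
    rw [pvEssential_sum]; omega
  have hB : PySem.List.pyGetD (pvPref (p0::p1::p2::p3::rest)) 4 0 ≥ max_size := by
    rw [pvPref_at4]; omega
  rw [if_pos hA, if_pos hB]

@[simp]
theorem compress_token_py_raises : Claim_raises_compress_token_py := by
  unfold Claim_raises_compress_token_py
  refine ⟨?_, by decide⟩
  intro token max_size hdom hr hpre
  obtain ⟨a1, a2, a3, a4⟩ := hr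
  rcases hpre with h | h | h | h <;> omega
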